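-- pv_equiv track=rewrite | github.com/volcengine/verl | atropos/environments/intern_bootcamp/internbootcamp_lib/internbootcamp/bootcamp/cremovingcolumns/cremovingcolumns.py | compute_min_removals
-- ===== SOURCE A (Python) =====
-- def compute_min_removals(n, m, rows):
--     if n <= 1:
--         return 0
--     deleted = set()
--     fixed = [False] * (n-1)
--     for col in range(m):
--         delete_col = False
--         for i in range(n-1):
--             if fixed[i]:
--                 continue
--             if rows[i][col] > rows[i+1][col]:
--                 delete_col = True
--                 break
--         if delete_col:
--             deleted.add(col)
--         else:
--             for i in range(n-1):
--                 if not fixed[i] and rows[i][col] < rows[i+1][col]: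
--                     fixed[i] = True
--     return len(deleted)
-- ===== SOURCE B (Python) =====
-- def compute_min_removals(n, m, rows):
--     # Fewer than two rows are always lexicographically sorted.
--     if n <= 1:
--         return 0
--     # Maintain, for each of the first n rows, the string of kept columns so far
--     # ("keys"); a column is kept iff appending its characters keeps the keys
--     # non-decreasing, otherwise it is counted as removed.
--     removed = 0
--     keys = [''] * n
--     for col in range(m):
--         cand = [k + r[col] for k, r in zip(keys, rows)]
--         if all(a <= b for a, b in zip(cand, cand[1:])):
--             keys = cand
--         else:
--             removed += 1
--     return removed
-- ===== Notes on version B (the rewrite author's own statement) =====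
-- stated objective: alternative
-- what changed: B drops A's boolean fixed-pairs array and deleted-set entirely: it keeps, per row, the string of kept columns so far and keeps a column iff appending its characters leaves that key list non-decreasing, counting rejected columns.
-- outside the precondition, e.g. on compute_min_removals(2, 3, ['a', 'b']): A returns 0, B raises IndexError
import Mathlib
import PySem

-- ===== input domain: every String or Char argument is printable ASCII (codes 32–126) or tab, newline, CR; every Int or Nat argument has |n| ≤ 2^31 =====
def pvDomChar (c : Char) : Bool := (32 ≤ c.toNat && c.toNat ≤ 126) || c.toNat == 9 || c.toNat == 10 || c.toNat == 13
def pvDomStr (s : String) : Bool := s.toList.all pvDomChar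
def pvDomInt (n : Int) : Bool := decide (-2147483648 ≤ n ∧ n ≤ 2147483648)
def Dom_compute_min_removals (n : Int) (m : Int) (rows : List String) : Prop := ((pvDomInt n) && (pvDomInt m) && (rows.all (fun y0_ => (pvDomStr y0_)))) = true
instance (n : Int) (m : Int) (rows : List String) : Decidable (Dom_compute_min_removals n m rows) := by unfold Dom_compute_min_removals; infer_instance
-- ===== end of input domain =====

-- B replaces A's boolean fixed-pairs array and deleted-set by per-row strings of the kept
-- columns, keeping a column iff the key list stays non-decreasing (objective: alternative).

-- ===== PORT A =====

-- rows[i][col], total-ized with defaults; on Pre_ every access A performs is in range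
def pvCellA (rows : List String) (i col : Int) : Char :=
  (PySem.Str.pyGet? ((PySem.List.pyGet? rows i).getD "") col).getD ' '

-- the inner 'for i in range(n-1): … break' loop (continue on fixed[i], break on '>')
def pvBreakA (rows : List String) (col : Int) (fixed : List Bool) : List Int → Bool
  | [] => false
  | i :: rest =>
    if (PySem.List.pyGet? fixed i).getD false then pvBreakA rows col fixed rest
    else if pvCellA rows (i + 1) col < pvCellA rows i col then true
    else pvBreakA rows col fixed rest

-- the 'else: for i in range(n-1): if not fixed[i] and … : fixed[i] = True' loop
def pvFixA (rows : List String) (col : Int) (fixed : List Bool) (is_ : List Int) : List Bool :=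
  is_.foldl (fun f i =>
    if !((PySem.List.pyGet? f i).getD false) &&
       decide (pvCellA rows i col < pvCellA rows (i + 1) col)
    then f.set i.toNat true else f) fixed

def compute_min_removals (n : Int) (m : Int) (rows : List String) : Int :=
  if n ≤ 1 then 0
  else
    let st := (PySem.List.pyRange 0 m 1).foldl
      (fun (st : PySem.Set Int × List Bool) col =>
        if pvBreakA rows col st.2 (PySem.List.pyRange 0 (n - 1) 1) then
          (PySem.Set.add st.1 col, st.2)
        else
          (st.1, pvFixA rows col st.2 (PySem.List.pyRange 0 (n - 1) 1)))
      (PySem.Set.empty, List.replicate (n - 1).toNat false)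
    PySem.Set.len st.1

-- ===== PORT B =====

-- Python string '<=': lexicographic by code point, a proper prefix is smaller
def pvLexLe : List Char → List Char → Bool
  | [], _ => true
  | _ :: _, [] => false
  | a :: as, b :: bs => if a < b then true else if b < a then false else pvLexLe as bs

-- r[col], total-ized with a default; on Pre_ every access B performs is in range
def pvCellB (r : String) (col : Int) : Char := (PySem.Str.pyGet? r col).getD ' '

def compute_min_removals_alt (n : Int) (m : Int) (rows : List String) : Int :=
  if n ≤ 1 then 0
  else
  ((PySem.List.pyRange 0 m 1).foldl
    (fun (st : Int × List (List Char)) col =>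
      let cand := (st.2.zip rows).map (fun p => p.1 ++ [pvCellB p.2 col])
      if (cand.zip cand.tail).all (fun q => pvLexLe q.1 q.2) then (st.1, cand)
      else (st.1 + 1, st.2))
    (0, List.replicate n.toNat ([] : List Char))).1

-- ===== PRECONDITION & SPEC =====
-- Pre_ excludes inputs where Python raises IndexError; it conservatively requires the first n
-- rows to carry at least m characters even though A may return without reading every cell
-- (a pair can become fixed, or a column deleted, before a short row's missing cell is
-- read) — such returning inputs are excluded because B does read those cells and would
-- raise there.
def Pre_compute_min_removals (n : Int) (m : Int) (rows : List String) : Prop :=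
  n ≤ 1 ∨ m ≤ 0 ∨ (n ≤ (rows.length : Int) ∧ ∀ r ∈ rows.take n.toNat, m ≤ PySem.Str.len r)
instance (n : Int) (m : Int) (rows : List String) : Decidable (Pre_compute_min_removals n m rows) := by
  unfold Pre_compute_min_removals; infer_instance

def pvWitness_compute_min_removals : Int × Int × List String := (3, 2, ["ba", "ab", "ab"])

def Spec_compute_min_removals (n : Int) (m : Int) (rows : List String) (out : Int) : Prop :=
  out = compute_min_removals_alt n m rows
instance (n : Int) (m : Int) (rows : List String) (out : Int) : Decidable (Spec_compute_min_removals n m rows out) := by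
  unfold Spec_compute_min_removals; infer_instance

-- ===== CLAIM (what is proved, stated in full; the proofs are below) =====
def Claim_equal_compute_min_removals : Prop := ∀ (n : Int) (m : Int) (rows : List String), Dom_compute_min_removals n m rows → Pre_compute_min_removals n m rows → Spec_compute_min_removals n m rows (compute_min_removals n m rows)

-- ===== LEMMAS AND PROOFS =====

-- A's break loop is an 'any' over the index list
theorem pvBreakA_eq_any (rows : List String) (col : Int) (fixed : List Bool) (l : List Int) :
    pvBreakA rows col fixed l =
      l.any (fun i => !((PySem.List.pyGet? fixed i).getD false) &&
        decide (pvCellA rows (i + 1) col < pvCellA rows i col)) := by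
  induction l with
  | nil => rfl
  | cons i rest ih =>
    simp only [pvBreakA, List.any_cons, ← ih]
    by_cases h1 : (PySem.List.pyGet? fixed i).getD false
    · simp [h1]
    · by_cases h2 : pvCellA rows (i + 1) col < pvCellA rows i col <;> simp [h1, h2]

-- adjacent-pairs 'all' over zip-with-tail, read pointwise
theorem pvAllAdj {α : Type} (p : α → α → Bool) (d : α) (l : List α) :
    ((l.zip l.tail).all fun q => p q.1 q.2) = true ↔
      ∀ j : Nat, j + 1 < l.length → p (l.getD j d) (l.getD (j + 1) d) = true := by
  induction l with
  | nil => simp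
  | cons a t ih =>
    cases t with
    | nil => simp
    | cons b t' =>
      simp only [List.tail_cons] at ih ⊢
      simp only [List.zip_cons_cons, List.all_cons, Bool.and_eq_true, ih]
      constructor
      · rintro ⟨h0, h⟩ j hj
        cases j with
        | zero => simpa using h0
        | succ j' => simpa using h j' (by simpa [List.length_cons] using hj)
      · intro h
        refine ⟨by simpa using h 0 (by simp), ?_⟩
        intro j hj
        simpa using h (j + 1) (by simpa [List.length_cons] using hj)

theorem pvLexLe_append_same (k : List Char) (a b : Char) :
    pvLexLe (k ++ [a]) (k ++ [b]) = true ↔ a ≤ b := by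
  induction k with
  | nil =>
    simp only [List.nil_append, pvLexLe]
    rcases lt_trichotomy a b with h | h | h
    · simp [h, le_of_lt h]
    · simp [h]
    · simp [h, not_lt_of_gt h, not_le_of_gt h]
  | cons c t ih => simpa [pvLexLe] using ih

theorem pvLexLe_append_of_ne :
    ∀ (k1 k2 : List Char), k1.length = k2.length → pvLexLe k1 k2 = true → k1 ≠ k2 →
      ∀ (x y : List Char), pvLexLe (k1 ++ x) (k2 ++ y) = true
  | [], [], _, _, hne, _, _ => absurd rfl hne
  | [], _ :: _, hlen, _, _, _, _ => by simp at hlen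
  | _ :: _, [], hlen, _, _, _, _ => by simp at hlen
  | a :: t1, b :: t2, hlen, hle, hne, x, y => by
    simp only [List.cons_append, pvLexLe]
    rcases lt_trichotomy a b with h | h | h
    · simp [h]
    · subst h
      simp only [lt_irrefl, if_false]
      have hle' : pvLexLe t1 t2 = true := by simpa [pvLexLe] using hle
      have hne' : t1 ≠ t2 := fun he => hne (by rw [he])
      exact pvLexLe_append_of_ne t1 t2 (by simpa using hlen) hle' hne' x y
    · exfalso
      simp [pvLexLe, h, not_lt_of_gt h] at hle

theorem pvAppend_ne {k1 k2 : List Char} (hlen : k1.length = k2.length) (hne : k1 ≠ k2)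
    (x y : List Char) : k1 ++ x ≠ k2 ++ y :=
  fun h => hne (List.append_inj_left h hlen)

-- the per-pair invariant tying A's fixed array to B's key list
def pvInv (N : Nat) (fixed : List Bool) (keys : List (List Char)) : Prop :=
  fixed.length = N - 1 ∧ keys.length = N ∧
  ∀ j : Nat, j + 1 < N →
    (keys.getD j []).length = (keys.getD (j + 1) []).length ∧
    pvLexLe (keys.getD j []) (keys.getD (j + 1) []) = true ∧
    (fixed.getD j false = true ↔ keys.getD j [] ≠ keys.getD (j + 1) [])

theorem pvFixA_length (rows : List String) (col : Int) :
    ∀ (l : List Int) (f : List Bool), (pvFixA rows col f l).length = f.length := by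
  intro l
  induction l with
  | nil => intro f; rfl
  | cons i rest ih =>
    intro f
    have : pvFixA rows col f (i :: rest) =
        pvFixA rows col
          (if !((PySem.List.pyGet? f i).getD false) &&
              decide (pvCellA rows i col < pvCellA rows (i + 1) col)
           then f.set i.toNat true else f) rest := rfl
    rw [this, ih]
    split <;> simp

theorem pvFixA_getD (rows : List String) (col : Int) :
    ∀ (l : List Int) (f : List Bool), l.Nodup →
      (∀ i ∈ l, 0 ≤ i ∧ i < (f.length : Int)) → ∀ j : Nat,
      (pvFixA rows col f l).getD j false =
        if (j : Int) ∈ l then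
          f.getD j false || decide (pvCellA rows (j : Int) col < pvCellA rows ((j : Int) + 1) col)
        else f.getD j false := by
  intro l
  induction l with
  | nil => intro f _ _ j; simp [pvFixA]
  | cons i rest ih =>
    intro f hnd hb j
    have hstep : pvFixA rows col f (i :: rest) =
        pvFixA rows col
          (if !((PySem.List.pyGet? f i).getD false) &&
              decide (pvCellA rows i col < pvCellA rows (i + 1) col)
           then f.set i.toNat true else f) rest := rfl
    set f' := (if !((PySem.List.pyGet? f i).getD false) &&
        decide (pvCellA rows i col < pvCellA rows (i + 1) col)
       then f.set i.toNat true else f) with hf'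
    have hlen' : f'.length = f.length := by rw [hf']; split <;> simp
    have hbi := hb i (List.mem_cons_self ..)
    rw [hstep, ih f' (List.nodup_cons.mp hnd).2
      (fun x hx => by rw [hlen']; exact hb x (List.mem_cons_of_mem _ hx)) j]
    by_cases hji : (j : Int) = i
    · subst hji
      have hjrest : (j : Int) ∉ rest := (List.nodup_cons.mp hnd).1
      have hjlen : j < f.length := by omega
      rw [if_neg hjrest, if_pos (List.mem_cons_self ..)]
      have hget : (PySem.List.pyGet? f (j : Int)).getD false = f.getD j false := by
        rw [PySem.List.pyGet?_of_nonneg f hbi.1, List.getD_eq_getElem?_getD]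
        simp
      rw [hf', hget]
      simp only [Int.toNat_natCast, List.getD_eq_getElem?_getD]
      by_cases hfj : f[j]?.getD false = true
      · rw [if_neg (by simp [hfj]), hfj]
        simp
      · have hfj' : f[j]?.getD false = false := by simpa using hfj
        by_cases hc : pvCellA rows (j : Int) col < pvCellA rows ((j : Int) + 1) col
        · rw [if_pos (by simp [hfj', hc])]
          rw [List.getElem?_set_self', List.getElem?_eq_getElem hjlen]
          simp [hc]
        · rw [if_neg (by simp [hc]), hfj']
          simp [hc]
    · have hne' : f'.getD j false = f.getD j false := by
        rw [hf']
        split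
        · rw [List.getD_eq_getElem?_getD, List.getElem?_set_ne (by omega),
            ← List.getD_eq_getElem?_getD]
        · rfl
      rw [hne']
      simp [List.mem_cons, hji]

-- B's candidate key at index j, written through A's cell reader
theorem pvCand_getD (rows : List String) (keys : List (List Char)) (col : Int)
    (hk : keys.length ≤ rows.length) (j : Nat) (hj : j < keys.length) :
    ((keys.zip rows).map (fun p => p.1 ++ [pvCellB p.2 col])).getD j [] =
      keys.getD j [] ++ [pvCellA rows (j : Int) col] := by
  have h1 : j < (keys.zip rows).length := by
    rw [List.length_zip]; omega
  rw [List.getD_eq_getElem?_getD, List.getElem?_map, List.getElem?_eq_getElem h1,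
    List.getElem_zip]
  have hjr : j < rows.length := by omega
  have hcell : pvCellB rows[j] col = pvCellA rows (j : Int) col := by
    simp [pvCellA, pvCellB, PySem.List.pyGet?_natCast, List.getElem?_eq_getElem hjr]
  simp [hcell, List.getD_eq_getElem?_getD, List.getElem?_eq_getElem hj]

-- per column: A's break test is the negation of B's sortedness test
theorem pvStep_break (rows : List String) (n : Int) (col : Int) (fixed : List Bool)
    (keys : List (List Char)) (hn : 2 ≤ n) (hrows : n ≤ (rows.length : Int))
    (hInv : pvInv n.toNat fixed keys) :
    pvBreakA rows col fixed (PySem.List.pyRange 0 (n - 1) 1) =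
      !((((keys.zip rows).map (fun p => p.1 ++ [pvCellB p.2 col])).zip
          ((keys.zip rows).map (fun p => p.1 ++ [pvCellB p.2 col])).tail).all
        (fun q => pvLexLe q.1 q.2)) := by
  obtain ⟨hflen, hklen, hinv⟩ := hInv
  set cand := (keys.zip rows).map (fun p => p.1 ++ [pvCellB p.2 col]) with hcand
  have hclen : cand.length = n.toNat := by
    rw [hcand, List.length_map, List.length_zip]; omega
  have hcg : ∀ j : Nat, j < n.toNat →
      cand.getD j [] = keys.getD j [] ++ [pvCellA rows (j : Int) col] := by
    intro j hj
    exact pvCand_getD rows keys col (by omega) j (by omega)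
  have key : ∀ j : Nat, j + 1 < n.toNat →
      ((!((PySem.List.pyGet? fixed (j : Int)).getD false) &&
        decide (pvCellA rows ((j : Int) + 1) col < pvCellA rows (j : Int) col)) = true
       ↔ ¬ (pvLexLe (cand.getD j []) (cand.getD (j + 1) []) = true)) := by
    intro j hj
    obtain ⟨hl, hle, hflag⟩ := hinv j hj
    have hgf : (PySem.List.pyGet? fixed (j : Int)).getD false = fixed.getD j false := by
      rw [PySem.List.pyGet?_of_nonneg fixed (by omega), List.getD_eq_getElem?_getD]
      simp
    have hcast : ((j : Int) + 1) = (((j + 1 : Nat)) : Int) := by push_cast; ring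
    rw [hcg j (by omega), hcg (j + 1) hj, hgf, hcast]
    by_cases hf : fixed.getD j false = true
    · have hne := hflag.mp hf
      have hmono := pvLexLe_append_of_ne _ _ hl hle hne
        [pvCellA rows (j : Int) col] [pvCellA rows ((j + 1 : Nat) : Int) col]
      exact iff_of_false (by rw [hf]; simp) (not_not_intro hmono)
    · have hf' : fixed.getD j false = false := by simpa using hf
      have heq : keys.getD j [] = keys.getD (j + 1) [] := by
        by_contra hne
        exact hf (hflag.mpr hne)
      rw [heq, hf']
      simp only [Bool.not_false, Bool.true_and, decide_eq_true_eq]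
      constructor
      · intro hlt hle2
        rw [pvLexLe_append_same] at hle2
        exact absurd hle2 (not_le_of_gt hlt)
      · intro hnle
        by_contra hno
        exact hnle ((pvLexLe_append_same _ _ _).mpr (le_of_not_gt hno))
  rw [pvBreakA_eq_any]
  by_cases hall : ((cand.zip cand.tail).all fun q => pvLexLe q.1 q.2) = true
  · rw [hall]
    simp only [Bool.not_true]
    rw [List.any_eq_false]
    intro i hi
    rw [PySem.List.mem_pyRange_one] at hi
    have hji : i = ((i.toNat : Nat) : Int) := by omega
    have hjb : i.toNat + 1 < n.toNat := by omega
    rw [hji]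
    intro hcontra
    exact ((key i.toNat hjb).mp hcontra)
      ((pvAllAdj _ [] cand).mp hall i.toNat (by omega))
  · have hfalse : ((cand.zip cand.tail).all fun q => pvLexLe q.1 q.2) = false := by
      simpa using hall
    rw [hfalse]
    simp only [Bool.not_false]
    rw [List.any_eq_true]
    have : ¬ ∀ j : Nat, j + 1 < cand.length →
        pvLexLe (cand.getD j []) (cand.getD (j + 1) []) = true := by
      intro hforall
      exact hall ((pvAllAdj _ [] cand).mpr hforall)
    push Not at this
    obtain ⟨j, hj, hjle⟩ := this
    refine ⟨(j : Int), ?_, ?_⟩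
    · rw [PySem.List.mem_pyRange_one]
      constructor
      · omega
      · omega
    · exact (key j (by omega)).mpr hjle

-- per column, keep case: the invariant is preserved
theorem pvStep_keep (rows : List String) (n : Int) (col : Int) (fixed : List Bool)
    (keys : List (List Char)) (hn : 2 ≤ n) (hrows : n ≤ (rows.length : Int))
    (hInv : pvInv n.toNat fixed keys)
    (hall : ((((keys.zip rows).map (fun p => p.1 ++ [pvCellB p.2 col])).zip
        ((keys.zip rows).map (fun p => p.1 ++ [pvCellB p.2 col])).tail).all
      (fun q => pvLexLe q.1 q.2)) = true) :
    pvInv n.toNat (pvFixA rows col fixed (PySem.List.pyRange 0 (n - 1) 1))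
      ((keys.zip rows).map (fun p => p.1 ++ [pvCellB p.2 col])) := by
  obtain ⟨hflen, hklen, hinv⟩ := hInv
  set cand := (keys.zip rows).map (fun p => p.1 ++ [pvCellB p.2 col]) with hcand
  have hclen : cand.length = n.toNat := by
    rw [hcand, List.length_map, List.length_zip]; omega
  have hcg : ∀ j : Nat, j < n.toNat →
      cand.getD j [] = keys.getD j [] ++ [pvCellA rows (j : Int) col] := by
    intro j hj
    exact pvCand_getD rows keys col (by omega) j (by omega)
  have hfix : ∀ j : Nat, j + 1 < n.toNat →
      (pvFixA rows col fixed (PySem.List.pyRange 0 (n - 1) 1)).getD j false =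
        (fixed.getD j false ||
          decide (pvCellA rows (j : Int) col < pvCellA rows ((j : Int) + 1) col)) := by
    intro j hj
    rw [pvFixA_getD rows col _ fixed (PySem.List.nodup_pyRange_one 0 (n - 1))
      (fun i hi => by rw [PySem.List.mem_pyRange_one] at hi; omega) j]
    rw [if_pos (by rw [PySem.List.mem_pyRange_one]; omega)]
  refine ⟨by rw [pvFixA_length, hflen], by omega, ?_⟩
  intro j hj
  have hcast : ((j : Int) + 1) = (((j + 1 : Nat)) : Int) := by push_cast; ring
  have hle' : pvLexLe (cand.getD j []) (cand.getD (j + 1) []) = true :=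
    (pvAllAdj _ [] cand).mp hall j (by omega)
  obtain ⟨hl, hle, hflag⟩ := hinv j hj
  refine ⟨by rw [hcg j (by omega), hcg (j + 1) hj]
             simp only [List.length_append, List.length_cons, List.length_nil, hl], hle', ?_⟩
  rw [hfix j hj, hcg j (by omega), hcg (j + 1) hj]
  by_cases hf : fixed.getD j false = true
  · have hne := hflag.mp hf
    simp only [hf, Bool.true_or, true_iff]
    exact pvAppend_ne hl hne _ _
  · have hf' : fixed.getD j false = false := by simpa using hf
    have heq : keys.getD j [] = keys.getD (j + 1) [] := by
      by_contra hne
      exact hf (hflag.mpr hne)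
    have hcle : pvCellA rows (j : Int) col ≤ pvCellA rows ((j + 1 : Nat) : Int) col := by
      have h2 := hle'
      rw [hcg j (by omega), hcg (j + 1) hj, heq] at h2
      exact (pvLexLe_append_same _ _ _).mp h2
    rw [heq, hcast]
    simp only [hf', Bool.false_or, decide_eq_true_eq, ne_eq, List.append_cancel_left_eq,
      List.cons.injEq, and_true]
    constructor
    · intro hlt heq2
      exact absurd heq2 (ne_of_lt hlt)
    · intro hne2
      exact lt_of_le_of_ne hcle hne2

-- the column fold, related step by step
theorem pvFold (rows : List String) (n : Int) (hn : 2 ≤ n) (hrows : n ≤ (rows.length : Int)) :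
    ∀ (L : List Int), L.Nodup → ∀ (sa : PySem.Set Int × List Bool) (sb : Int × List (List Char)),
      pvInv n.toNat sa.2 sb.2 → PySem.Set.len sa.1 = sb.1 → (∀ x ∈ sa.1, x ∉ L) →
      PySem.Set.len ((L.foldl
        (fun (st : PySem.Set Int × List Bool) col =>
          if pvBreakA rows col st.2 (PySem.List.pyRange 0 (n - 1) 1) then
            (PySem.Set.add st.1 col, st.2)
          else
            (st.1, pvFixA rows col st.2 (PySem.List.pyRange 0 (n - 1) 1))) sa).1) =
      (L.foldl
        (fun (st : Int × List (List Char)) col =>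
          let cand := (st.2.zip rows).map (fun p => p.1 ++ [pvCellB p.2 col])
          if (cand.zip cand.tail).all (fun q => pvLexLe q.1 q.2) then (st.1, cand)
          else (st.1 + 1, st.2)) sb).1 := by
  intro L
  induction L with
  | nil =>
    intro _ sa sb _ hlen _
    exact hlen
  | cons col L' ih =>
    intro hnd sa sb hInv hlen hnotin
    rw [List.foldl_cons, List.foldl_cons]
    have hbreak := pvStep_break rows n col sa.2 sb.2 hn hrows hInv
    by_cases hall : ((((sb.2.zip rows).map (fun p => p.1 ++ [pvCellB p.2 col])).zip
        ((sb.2.zip rows).map (fun p => p.1 ++ [pvCellB p.2 col])).tail).all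
      (fun q => pvLexLe q.1 q.2)) = true
    · -- column kept on both sides
      rw [hbreak, hall]
      simp only [Bool.not_true, Bool.false_eq_true, if_false, hall, if_true]
      exact ih (List.nodup_cons.mp hnd).2 _ _
        (pvStep_keep rows n col sa.2 sb.2 hn hrows hInv hall) hlen
        (fun x hx => fun hmem => hnotin x hx (List.mem_cons_of_mem _ hmem))
    · -- column removed on both sides
      have hfalse : ((((sb.2.zip rows).map (fun p => p.1 ++ [pvCellB p.2 col])).zip
          ((sb.2.zip rows).map (fun p => p.1 ++ [pvCellB p.2 col])).tail).all
        (fun q => pvLexLe q.1 q.2)) = false := by simpa using hall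
      rw [hbreak, hfalse]
      simp only [Bool.not_false, if_true, hfalse, Bool.false_eq_true, if_false]
      have hcol : col ∉ sa.1 := fun h => hnotin col h (List.mem_cons_self ..)
      refine ih (List.nodup_cons.mp hnd).2 (PySem.Set.add sa.1 col, sa.2) (sb.1 + 1, sb.2)
        hInv ?_ ?_
      · rw [PySem.Set.add_of_not_mem hcol]
        simp only [PySem.Set.len, List.length_append, List.length_cons, List.length_nil] at hlen ⊢
        omega
      · intro x hx
        rw [PySem.Set.add_of_not_mem hcol, List.mem_append] at hx
        rcases hx with hx | hx
        · exact fun hmem => hnotin x hx (List.mem_cons_of_mem _ hmem)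
        · have hxc : x = col := by simpa using hx
          subst hxc
          exact (List.nodup_cons.mp hnd).1

-- the initial states satisfy the invariant
theorem pvInvInit (n : Int) (hn : 2 ≤ n) :
    pvInv n.toNat (List.replicate (n - 1).toNat false) (List.replicate n.toNat ([] : List Char)) := by
  refine ⟨by simp only [List.length_replicate]; omega, by simp, ?_⟩
  intro j hj
  simp only [List.getD_eq_getElem?_getD, List.getElem?_replicate]
  split_ifs <;> simp [pvLexLe]

theorem compute_min_removals_spec : Claim_equal_compute_min_removals := by
  intro n m rows _ hpre
  show compute_min_removals n m rows = compute_min_removals_alt n m rows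
  by_cases hn1 : n ≤ 1
  · rw [compute_min_removals, if_pos hn1, compute_min_removals_alt, if_pos hn1]
  · have hn2 : 2 ≤ n := by omega
    rcases hpre with h0 | hm0 | ⟨hrows, _⟩
    · omega
    · rw [compute_min_removals, if_neg hn1, compute_min_removals_alt, if_neg hn1,
        PySem.List.pyRange_one_eq_nil (a := 0) (b := m) hm0]
      simp [PySem.Set.len, PySem.Set.empty]
    rw [compute_min_removals, if_neg hn1, compute_min_removals_alt, if_neg hn1]
    exact pvFold rows n hn2 hrows (PySem.List.pyRange 0 m 1)
      (PySem.List.nodup_pyRange_one 0 m)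
      (PySem.Set.empty, List.replicate (n - 1).toNat false)
      (0, List.replicate n.toNat ([] : List Char))
      (pvInvInit n hn2) rfl (fun x hx => absurd hx (List.not_mem_nil))
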